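-- pv_equiv track=rewrite | github.com/HeelinMistry/clubelo_comparison | summary_generator.py | clean_docstring
-- ===== SOURCE A (Python) =====
-- def clean_docstring(doc):
--     """Cleans up the docstring for Markdown output, ensuring arguments and returns
--        are listed on separate lines and descriptions are clearly separated by ':'.
--     """
--     if not doc:
--         return "No documentation available."
--
--     lines = doc.strip().split('\n')
--     summary_lines = []
--     details = []
--     capture_details = False
--
--     # 1. Capture the summary until the first structured keyword
--     for line in lines:
--         stripped = line.strip()
--
--         # Check for structured section keywords (Args/Returns)
--         if stripped.startswith('Args:'):
--             # FIX 1: Use two newlines to guarantee separation from the summary text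
--             details.append("\n\n**Arguments:**\n")
--             capture_details = True
--             continue
--         elif stripped.startswith('Returns:'):
--             # FIX 1: Use two newlines to guarantee separation
--             details.append("\n\n**Returns:**\n")
--             capture_details = True
--             continue
--
--             # If we are not capturing structured details yet:
--         if not capture_details:
--             if not stripped:
--                 # Stop capturing the summary on the first blank line
--                 capture_details = True
--                 continue
--             summary_lines.append(stripped)
--
--         # 2. Capture the details (Argument/Return lines)
--         elif capture_details and stripped:
--             clean_item = stripped.lstrip('*- ').strip()
--
--             if ':' in clean_item:
--                 parts = clean_item.split(':', 1)
--                 name = parts[0].strip()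
--                 description = parts[1].strip()
--
--                 # Clean up name part (e.g., remove type annotations like ': str')
--                 if ' ' in name:
--                     name = name.split(' ')[0]
--
--                     # Append the formatted line, guaranteeing a new line for each item
--                 details.append(f"* **{name}:** {description}")
--             else:
--                 # Handle multi-line descriptions (appending to the last item)
--                 if details and details[-1].startswith('* '):
--                     details[-1] = details[-1] + ' ' + clean_item
--                 else:
--                     details.append(f"* {clean_item}")
--
--     # Join the summary text with spaces
--     summary = ' '.join(summary_lines)
--
--     # FIX 2: Join the summary and all details using minimal space
--     # The newlines are already embedded in the details list items (e.g., "\n\n**Arguments:**")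
--     return f"{summary}{' '.join(details)}"
-- ===== SOURCE B (Python) =====
-- def clean_docstring(doc):
--     """Same Markdown formatting via a partition-into-sections pass instead of a
--     single stateful loop."""
--     if not doc:
--         return "No documentation available."
--
--     lines = [ln.strip() for ln in doc.strip().split('\n')]
--
--     def is_header(ln):
--         if ln.startswith('Args:'):
--             return "\n\n**Arguments:**\n"
--         if ln.startswith('Returns:'):
--             return "\n\n**Returns:**\n"
--         return None
--
--     # summary = lines before the first blank or header line
--     i = 0
--     summary = []
--     while i < len(lines) and lines[i] and is_header(lines[i]) is None:
--         summary.append(lines[i])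
--         i += 1
--
--     # partition the remainder into blocks: (header-or-None, body lines)
--     blocks = [(None, [])]
--     for ln in lines[i:]:
--         hdr = is_header(ln)
--         if hdr is not None:
--             blocks.append((hdr, []))
--         elif ln:
--             blocks[-1][1].append(ln)
--
--     # format each block independently
--     details = []
--     for hdr, body in blocks:
--         out = [] if hdr is None else [hdr]
--         for ln in body:
--             item = ln.lstrip('*- ').strip()
--             if ':' in item:
--                 name, desc = item.split(':', 1)
--                 out.append("* **%s:** %s" % (name.strip().split(' ')[0], desc.strip()))
--             elif out and out[-1].startswith('* '):
--                 out[-1] += ' ' + item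
--             else:
--                 out.append('* ' + item)
--         details.extend(out)
--
--     return ' '.join(summary) + ' '.join(details)
-- ===== Notes on version B (the rewrite author's own statement) =====
-- stated objective: alternative
-- what changed: A's single stateful loop (summary/details accumulators plus a capture flag, with cross-iteration last-item mutation) is replaced by a two-pass pipeline: first partition the stripped lines into a summary prefix and per-header blocks, then format each block independently and concatenate.
import Mathlib
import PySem

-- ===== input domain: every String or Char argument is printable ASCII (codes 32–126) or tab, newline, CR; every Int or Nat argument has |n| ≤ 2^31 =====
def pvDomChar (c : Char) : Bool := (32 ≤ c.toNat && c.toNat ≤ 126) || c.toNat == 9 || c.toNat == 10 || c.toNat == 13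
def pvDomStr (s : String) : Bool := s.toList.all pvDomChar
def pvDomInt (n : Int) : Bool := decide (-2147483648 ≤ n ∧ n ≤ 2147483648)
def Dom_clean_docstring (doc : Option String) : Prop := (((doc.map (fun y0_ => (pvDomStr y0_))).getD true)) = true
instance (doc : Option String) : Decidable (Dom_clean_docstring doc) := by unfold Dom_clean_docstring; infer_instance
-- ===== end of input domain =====

-- B re-implements A's single stateful summary/details loop as a two-pass
-- partition-into-sections pipeline (same return value; objective: alternative decomposition).

-- ===== PORT A =====
-- A's loop body applied to the already-stripped line (A computes `stripped = line.strip()`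
-- first; the body is exact, branch for branch). State = (summary_lines, details, capture_details).
def pvStepBodyA (st : List (List Char) × List (List Char) × Bool) (stripped : List Char) :
    List (List Char) × List (List Char) × Bool :=
  let summary := st.1; let details := st.2.1; let capture := st.2.2
  if PySem.Chars.startswith stripped "Args:".toList then
    (summary, details ++ ["\n\n**Arguments:**\n".toList], true)
  else if PySem.Chars.startswith stripped "Returns:".toList then
    (summary, details ++ ["\n\n**Returns:**\n".toList], true)
  else if !capture then
    if stripped = [] then (summary, details, true)
    else (summary ++ [stripped], details, capture)
  else if stripped ≠ [] then
    -- clean_item = stripped.lstrip('*- ').strip(); lstrip(chars) drops leading chars of the set (exact)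
    let clean_item := PySem.Chars.strip
      (List.dropWhile (fun c => c = '*' || c = '-' || c = ' ') stripped)
    if PySem.Chars.isIn [':'] clean_item then
      let parts := PySem.Chars.splitOnMax clean_item [':'] 1
      let name := PySem.Chars.strip (parts.getD 0 [])
      let description := PySem.Chars.strip (parts.getD 1 [])
      -- if ' ' in name: name = name.split(' ')[0]  (split(' ') is never empty, so [0] never raises)
      let name := if PySem.Chars.isIn [' '] name then (PySem.Chars.splitOn name [' ']).getD 0 [] else name
      (summary, details ++ ["* **".toList ++ name ++ ":** ".toList ++ description], capture)
    else if (!details.isEmpty) && PySem.Chars.startswith details.getLast! "* ".toList then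
      (summary, details.dropLast ++ [details.getLast! ++ ' ' :: clean_item], capture)
    else
      (summary, details ++ ["* ".toList ++ clean_item], capture)
  else (summary, details, capture)

def pvStepA (st : List (List Char) × List (List Char) × Bool) (line : List Char) :
    List (List Char) × List (List Char) × Bool :=
  pvStepBodyA st (PySem.Chars.strip line)

def clean_docstring (doc : Option String) : String :=
  match doc with
  | none => "No documentation available."
  | some s =>
    if s.toList = [] then "No documentation available."  -- `if not doc` on a string = emptiness
    else
      let lines := PySem.Chars.splitOn (PySem.Chars.strip s.toList) ['\n']
      let st := lines.foldl pvStepA ([], [], false)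
      String.ofList (PySem.Chars.join [' '] st.1 ++ PySem.Chars.join [' '] st.2.1)

-- ===== PORT B =====
-- is_header: the header markdown for an Args:/Returns: line, else none
def pvHdrOf (ln : List Char) : Option (List Char) :=
  if PySem.Chars.startswith ln "Args:".toList then some "\n\n**Arguments:**\n".toList
  else if PySem.Chars.startswith ln "Returns:".toList then some "\n\n**Returns:**\n".toList
  else none

-- the body of B's per-block item loop (lines arrive already stripped)
def pvProcItem (out : List (List Char)) (ln : List Char) : List (List Char) :=
  let item := PySem.Chars.strip (List.dropWhile (fun c => c = '*' || c = '-' || c = ' ') ln)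
  if PySem.Chars.isIn [':'] item then
    let parts := PySem.Chars.splitOnMax item [':'] 1
    let name := PySem.Chars.strip (parts.getD 0 [])
    let desc := PySem.Chars.strip (parts.getD 1 [])
    out ++ ["* **".toList ++ (PySem.Chars.splitOn name [' ']).getD 0 [] ++ ":** ".toList ++ desc]
  else if (!out.isEmpty) && PySem.Chars.startswith out.getLast! "* ".toList then
    out.dropLast ++ [out.getLast! ++ ' ' :: item]
  else
    out ++ ["* ".toList ++ item]

-- B's summary while-loop: (summary lines, remaining lines)
def pvSplitSummary : List (List Char) → List (List Char) × List (List Char)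
  | [] => ([], [])
  | ln :: t =>
    if ln ≠ [] ∧ pvHdrOf ln = none then
      let r := pvSplitSummary t
      (ln :: r.1, r.2)
    else ([], ln :: t)

-- body of the current block (non-empty, non-header lines) and the rest, from the first header on
def pvParse : List (List Char) → List (List Char) × List (List Char)
  | [] => ([], [])
  | ln :: t =>
    if (pvHdrOf ln).isSome then ([], ln :: t)
    else
      let r := pvParse t
      (if ln ≠ [] then ln :: r.1 else r.1, r.2)

theorem pvParse_snd_length : ∀ ls : List (List Char), (pvParse ls).2.length ≤ ls.length := by
  intro ls
  induction ls with
  | nil => simp [pvParse]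
  | cons ln t ih =>
    simp only [pvParse]
    split
    · simp
    · exact Nat.le_succ_of_le ih

-- header blocks: the input starts at a header line (or is empty)
def pvBlocksAux : List (List Char) → List (Option (List Char) × List (List Char))
  | [] => []
  | ln :: t =>
    let pr := pvParse t
    (pvHdrOf ln, pr.1) :: pvBlocksAux pr.2
termination_by ls => ls.length
decreasing_by exact Nat.lt_succ_of_le (pvParse_snd_length t)

def pvFormatBlock (b : Option (List Char) × List (List Char)) : List (List Char) :=
  b.2.foldl pvProcItem (match b.1 with | none => [] | some h => [h])

def clean_docstring_alt (doc : Option String) : String :=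
  match doc with
  | none => "No documentation available."
  | some s =>
    if s.toList = [] then "No documentation available."
    else
      let lines := (PySem.Chars.splitOn (PySem.Chars.strip s.toList) ['\n']).map PySem.Chars.strip
      let sp := pvSplitSummary lines
      let pr := pvParse sp.2
      let blocks := ((none : Option (List Char)), pr.1) :: pvBlocksAux pr.2
      let details := blocks.flatMap pvFormatBlock
      String.ofList (PySem.Chars.join [' '] sp.1 ++ PySem.Chars.join [' '] details)

-- ===== PRECONDITION & SPEC =====
def Spec_clean_docstring (doc : Option String) (out : String) : Prop := out = clean_docstring_alt doc
instance (doc : Option String) (out : String) : Decidable (Spec_clean_docstring doc out) := by unfold Spec_clean_docstring; infer_instance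

-- ===== CLAIM (what is proved, stated in full; the proofs are below) =====
def Claim_equal_clean_docstring : Prop := ∀ (doc : Option String), Dom_clean_docstring doc → Spec_clean_docstring doc (clean_docstring doc)

-- ===== LEMMAS AND PROOFS =====

def pvStepD (d : List (List Char)) (ln : List Char) : List (List Char) :=
  match pvHdrOf ln with
  | some h => d ++ [h]
  | none => if ln = [] then d else pvProcItem d ln

theorem go_no_sep (s : List Char) (hs : ' ' ∉ s) :
    ∀ (fuel : Nat) (cur : List Char) (acc : List (List Char)),
      PySem.Chars.splitOn.go [' '] fuel s cur acc = ((cur.reverse ++ s) :: acc).reverse := by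
  induction s with
  | nil => intro fuel cur acc; cases fuel <;> simp [PySem.Chars.splitOn.go]
  | cons c rest ih =>
    intro fuel cur acc
    cases fuel with
    | zero => simp [PySem.Chars.splitOn.go]
    | succ n =>
      have hc : c ≠ ' ' := fun h => hs (h ▸ List.mem_cons_self)
      have hpre : List.isPrefixOf [' '] (c :: rest) = false := by
        simp [List.isPrefixOf, Ne.symm hc]
      rw [PySem.Chars.splitOn.go]
      simp only [hpre, Bool.false_eq_true, if_false]
      rw [ih (fun h => hs (List.mem_cons_of_mem _ h)) n (c :: cur) acc]
      simp

theorem pvSplitOn_space_of_not_mem (name : List Char) (h : ¬ PySem.Chars.isIn [' '] name = true) :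
    (PySem.Chars.splitOn name [' ']).getD 0 [] = name := by
  have hmem : ' ' ∉ name := fun hm =>
    h (by rw [PySem.Chars.isIn_iff_infix]; exact (List.singleton_infix_iff ' ' name).mpr hm)
  unfold PySem.Chars.splitOn
  rw [go_no_sep name hmem]
  simp

theorem pvStepBodyA_capture (s : List (List Char)) (d : List (List Char)) (ln : List Char) :
    pvStepBodyA (s, d, true) ln = (s, pvStepD d ln, true) := by
  unfold pvStepBodyA pvStepD pvHdrOf
  by_cases h1 : PySem.Chars.startswith ln "Args:".toList = true
  · simp only [h1, if_true]
  · simp only [h1, if_false, Bool.false_eq_true]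
    by_cases h2 : PySem.Chars.startswith ln "Returns:".toList = true
    · simp only [h2, if_true]
    · simp only [h2, if_false, Bool.false_eq_true, Bool.not_true]
      by_cases h3 : ln = []
      · subst h3; simp
      · simp only [h3, if_false, ite_false, if_neg h3, ne_eq, not_false_iff, if_true, ite_true]
        unfold pvProcItem
        by_cases h4 : PySem.Chars.isIn [':']
            (PySem.Chars.strip (List.dropWhile (fun c => c = '*' || c = '-' || c = ' ') ln)) = true
        · simp only [h4, if_true]
          by_cases h5 : PySem.Chars.isIn [' ']
              (PySem.Chars.strip ((PySem.Chars.splitOnMax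
                (PySem.Chars.strip (List.dropWhile (fun c => c = '*' || c = '-' || c = ' ') ln))
                [':'] 1).getD 0 [])) = true
          · simp only [h5, if_true]
          · simp only [h5, if_false, Bool.false_eq_true, pvSplitOn_space_of_not_mem _ h5]
        · simp only [h4, if_false, Bool.false_eq_true]; split_ifs <;> rfl

theorem getLastBang_concat (xs : List (List Char)) (y : List Char) : (xs ++ [y]).getLast! = y := by
  cases xs with
  | nil => rfl
  | cons a as => simp [List.getLast!]

theorem pvProcItem_ne_nil (out : List (List Char)) (ln : List Char) : pvProcItem out ln ≠ [] := by
  unfold pvProcItem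
  split_ifs <;> simp_all <;> split_ifs <;> simp

theorem pvProcItem_shift (p out : List (List Char)) (ln : List Char) (h : out ≠ []) :
    pvProcItem (p ++ out) ln = p ++ pvProcItem out ln := by
  have hd : out.dropLast ++ [out.getLast h] = out := List.dropLast_concat_getLast h
  obtain ⟨ys, y, rfl⟩ : ∃ ys y, out = ys ++ [y] := ⟨out.dropLast, out.getLast h, hd.symm⟩
  unfold pvProcItem
  simp only [← List.append_assoc, getLastBang_concat]
  have hne : ∀ (q : List (List Char)), (q ++ [y]).isEmpty = false := by simp
  simp only [hne]
  split_ifs <;>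
    simp_all [List.dropLast_concat, getLastBang_concat, List.dropLast_append_cons]
theorem pvFoldProc_shift (b : List (List Char)) (p out : List (List Char)) (h : out ≠ []) :
    b.foldl pvProcItem (p ++ out) = p ++ b.foldl pvProcItem out := by
  induction b generalizing out with
  | nil => simp
  | cons ln t ih =>
    simp only [List.foldl_cons, pvProcItem_shift p out ln h]
    exact ih _ (pvProcItem_ne_nil out ln)

theorem pvFold_capture (ls : List (List Char)) (s d : List (List Char)) :
    ls.foldl pvStepBodyA (s, d, true) = (s, ls.foldl pvStepD d, true) := by
  induction ls generalizing d with
  | nil => rfl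
  | cons ln t ih =>
    simp only [List.foldl_cons, pvStepBodyA_capture s d ln]
    exact ih _

theorem pvStepBodyA_nocapture (s d : List (List Char)) (ln : List Char) :
    pvStepBodyA (s, d, false) ln =
      match pvHdrOf ln with
      | some h => (s, d ++ [h], true)
      | none => if ln = [] then (s, d, true) else (s ++ [ln], d, false) := by
  unfold pvStepBodyA pvHdrOf
  by_cases h1 : PySem.Chars.startswith ln "Args:".toList = true
  · simp only [h1, if_true]
  · simp only [h1, if_false, Bool.false_eq_true]
    by_cases h2 : PySem.Chars.startswith ln "Returns:".toList = true
    · simp only [h2, if_true]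
    · simp only [h2, if_false, Bool.false_eq_true, Bool.not_false, if_true]
      all_goals split_ifs <;> rfl

theorem pvStepD_hdr (d : List (List Char)) (ln : List Char) (h : List Char)
    (hh : pvHdrOf ln = some h) : pvStepD d ln = d ++ [h] := by
  unfold pvStepD; rw [hh]

theorem pvFold_phase (ls : List (List Char)) : ∀ s d : List (List Char),
    (ls.foldl pvStepBodyA (s, d, false)).1 = s ++ (pvSplitSummary ls).1 ∧
    (ls.foldl pvStepBodyA (s, d, false)).2.1 = (pvSplitSummary ls).2.foldl pvStepD d := by
  induction ls with
  | nil => intro s d; simp [pvSplitSummary]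
  | cons ln t ih =>
    intro s d
    match hh : pvHdrOf ln with
    | some h =>
      have hcond : ¬ (ln ≠ [] ∧ pvHdrOf ln = none) := by simp [hh]
      have hsum : pvSplitSummary (ln :: t) = ([], ln :: t) := by
        simp only [pvSplitSummary, if_neg hcond]
      rw [hsum, List.foldl_cons, pvStepBodyA_nocapture, hh, pvFold_capture,
        List.foldl_cons, pvStepD_hdr d ln h hh]
      exact ⟨by simp, rfl⟩
    | none =>
      by_cases he : ln = []
      · subst he
        have hcond : ¬ (([] : List Char) ≠ [] ∧ pvHdrOf [] = none) := by simp
        have hsum : pvSplitSummary ([] :: t) = ([], [] :: t) := by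
          simp only [pvSplitSummary, if_neg hcond]
        have hs : pvStepD d [] = d := by unfold pvStepD; rw [hh]; rfl
        rw [hsum, List.foldl_cons, pvStepBodyA_nocapture, hh, List.foldl_cons, hs]
        rw [if_pos rfl, pvFold_capture]
        exact ⟨by simp, rfl⟩
      · have hcond : (ln ≠ [] ∧ pvHdrOf ln = none) := ⟨he, hh⟩
        have hsum : pvSplitSummary (ln :: t) =
            (ln :: (pvSplitSummary t).1, (pvSplitSummary t).2) := by
          simp only [pvSplitSummary, if_pos hcond]
        rw [hsum, List.foldl_cons, pvStepBodyA_nocapture, hh, if_neg he]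
        obtain ⟨ih1, ih2⟩ := ih (s ++ [ln]) d
        exact ⟨by rw [ih1, List.append_assoc]; rfl, ih2⟩

theorem pvFold_parse (ls : List (List Char)) : ∀ out : List (List Char),
    ls.foldl pvStepD out = (pvParse ls).2.foldl pvStepD ((pvParse ls).1.foldl pvProcItem out) := by
  induction ls with
  | nil => intro out; simp [pvParse]
  | cons ln t ih =>
    intro out
    by_cases hh : (pvHdrOf ln).isSome
    · have hp : pvParse (ln :: t) = ([], ln :: t) := by simp [pvParse, hh]
      rw [hp]; simp
    · have hnone : pvHdrOf ln = none := Option.not_isSome_iff_eq_none.mp hh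
      by_cases he : ln = []
      · subst he
        have hp : pvParse ([] :: t) = pvParse t := by simp [pvParse, hh]
        have hs : pvStepD out [] = out := by unfold pvStepD; rw [hnone]; rfl
        rw [List.foldl_cons, hs, hp]
        exact ih out
      · have hp : pvParse (ln :: t) = (ln :: (pvParse t).1, (pvParse t).2) := by
          simp [pvParse, hh, he]
        have hs : pvStepD out ln = pvProcItem out ln := by
          unfold pvStepD; rw [hnone, if_neg he]
        rw [List.foldl_cons, hs, hp]
        simp only [List.foldl_cons]
        exact ih (pvProcItem out ln)

theorem pvParse_snd_shape (ls : List (List Char)) :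
    (pvParse ls).2 = [] ∨ ∃ ln t, (pvParse ls).2 = ln :: t ∧ (pvHdrOf ln).isSome := by
  induction ls with
  | nil => left; simp [pvParse]
  | cons ln t ih =>
    by_cases hh : (pvHdrOf ln).isSome
    · right; exact ⟨ln, t, by simp [pvParse, hh], hh⟩
    · simpa only [pvParse, if_neg hh] using ih

theorem pvFold_blocks : ∀ ls : List (List Char),
    (ls = [] ∨ ∃ ln t, ls = ln :: t ∧ (pvHdrOf ln).isSome) → ∀ d : List (List Char),
    ls.foldl pvStepD d = d ++ (pvBlocksAux ls).flatMap pvFormatBlock := by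
  intro ls
  induction ls using pvBlocksAux.induct with
  | case1 => intro _ d; simp [pvBlocksAux]
  | case2 ln t pr ih =>
    intro hshape d
    rcases hshape with h | ⟨ln', t', heq, hsome⟩
    · exact absurd h (by simp)
    · obtain ⟨rfl, rfl⟩ : ln = ln' ∧ t = t' := by
        injection heq with h1 h2; exact ⟨h1, h2⟩
      obtain ⟨h, hh⟩ := Option.isSome_iff_exists.mp hsome
      have hb : pvBlocksAux (ln :: t) =
          (pvHdrOf ln, (pvParse t).1) :: pvBlocksAux (pvParse t).2 := by
        simp [pvBlocksAux]
      rw [List.foldl_cons, pvStepD_hdr d ln h hh,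
        pvFold_parse t (d ++ [h]), pvFoldProc_shift _ _ _ (by simp),
        ih (pvParse_snd_shape t) _, hb]
      simp only [List.flatMap_cons, pvFormatBlock, hh, List.append_assoc]
      rfl

theorem pvDetails_eq (rest : List (List Char)) :
    rest.foldl pvStepD ([] : List (List Char))
      = (((none : Option (List Char)), (pvParse rest).1) :: pvBlocksAux (pvParse rest).2).flatMap
          pvFormatBlock := by
  rw [pvFold_parse rest []]
  rw [pvFold_blocks (pvParse rest).2 (pvParse_snd_shape rest) _]
  simp only [List.flatMap_cons, pvFormatBlock]

theorem pvAB_eq : ∀ doc : Option String,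
    clean_docstring doc = clean_docstring_alt doc := by
  intro doc
  unfold clean_docstring clean_docstring_alt
  cases doc with
  | none => rfl
  | some s =>
    dsimp only
    by_cases hs : s.toList = []
    · rw [if_pos hs, if_pos hs]
    · rw [if_neg hs, if_neg hs]
      have hfold : ∀ lines : List (List Char), lines.foldl pvStepA ([], [], false)
          = (lines.map PySem.Chars.strip).foldl pvStepBodyA ([], [], false) := by
        intro lines; rw [List.foldl_map]; rfl
      rw [hfold]
      obtain ⟨h1, h2⟩ := pvFold_phase
        ((PySem.Chars.splitOn (PySem.Chars.strip s.toList) ['\n']).map PySem.Chars.strip) [] []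
      rw [h1, h2, List.nil_append, pvDetails_eq]

-- ===== VERDICT (by name: the statement is the Claim_ definition above) =====
theorem clean_docstring_spec : Claim_equal_clean_docstring := by
  intro doc _
  exact pvAB_eq doc
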